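-- pv_equiv track=rewrite | github.com/ADiTyaRaj8969/Graph | 24. DetectNegativeCycle.py | has_negative_cycle
-- ===== SOURCE A (Python) =====
-- def has_negative_cycle(V, edges):
--     dist = [0]*V
--     for i in range(V):
--         for u, v, w in edges:
--             if dist[u] + w < dist[v]:
--                 dist[v] = dist[u] + w
--                 if i == V-1:
--                     return True
--     return False
-- ===== SOURCE B (Python) =====
-- def has_negative_cycle(V, edges):
--     def sweep(d):
--         nd = list(d)
--         for u, v, w in edges:
--             if nd[u] + w < nd[v]:
--                 nd[v] = nd[u] + w
--         return nd
--
--     def go(d, k):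
--         if k <= 0:
--             return False
--         nd = sweep(d)
--         if nd == d:
--             return False
--         if k == 1:
--             return True
--         return go(nd, k - 1)
--
--     return go([0] * V, V)
-- ===== Notes on version B (the rewrite author's own statement) =====
-- stated objective: faster
-- what changed: B replaces A's indexed V-pass loop with fused last-pass early-return by a recursive fixpoint iteration: a pure functional sweep is applied repeatedly, stopping early (False) as soon as a sweep leaves dist unchanged, and reporting True only if the V-th sweep still changes dist; there is no pass index and no detection test inside the passes.
-- outside the precondition, e.g. on has_negative_cycle(1, [(0, 0, -1), (5, 0, 0)]): A returns True, B raises IndexError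
import Mathlib
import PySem

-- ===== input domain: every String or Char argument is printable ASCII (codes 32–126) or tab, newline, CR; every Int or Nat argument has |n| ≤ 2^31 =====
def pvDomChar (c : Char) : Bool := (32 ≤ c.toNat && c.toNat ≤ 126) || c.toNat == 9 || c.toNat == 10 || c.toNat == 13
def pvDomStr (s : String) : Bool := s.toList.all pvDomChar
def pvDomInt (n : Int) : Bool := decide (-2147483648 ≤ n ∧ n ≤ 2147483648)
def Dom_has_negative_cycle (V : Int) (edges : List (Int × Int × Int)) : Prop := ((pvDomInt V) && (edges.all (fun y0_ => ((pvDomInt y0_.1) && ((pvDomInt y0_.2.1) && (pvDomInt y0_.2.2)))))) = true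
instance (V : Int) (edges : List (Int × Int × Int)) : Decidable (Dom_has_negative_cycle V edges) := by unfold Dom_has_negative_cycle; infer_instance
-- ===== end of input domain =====

-- B replaces A's indexed V-pass loop (with the detection fused into pass V-1) by a recursive
-- fixpoint iteration of a pure sweep, exiting early once a sweep changes nothing (measured faster).

-- ===== PORT A =====
-- inner 'for u, v, w in edges' loop of A at pass i: .inl true = the 'return True' of the
-- final pass, .inr dist = loop finished with updated dist.  dist[u]/dist[v] read via
-- pyGetD (exact under Pre_: indices in range, Python raises outside Pre_), assignment via pySetD.
def pvAInner (V : Int) (i : Int) (dist : List Int) : List (Int × Int × Int) → Bool ⊕ List Int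
  | [] => .inr dist
  | (u, v, w) :: rest =>
    let du := PySem.List.pyGetD dist u 0
    let dv := PySem.List.pyGetD dist v 0
    if du + w < dv then
      let dist' := PySem.List.pySetD dist v (du + w)
      if i = V - 1 then .inl true
      else pvAInner V i dist' rest
    else pvAInner V i dist rest

-- outer 'for i in range(V)' loop of A
def pvAOuter (V : Int) (edges : List (Int × Int × Int)) : List Int → List Int → Bool
  | [], _ => false
  | i :: is, dist =>
    match pvAInner V i dist edges with
    | .inl b => b
    | .inr dist' => pvAOuter V edges is dist'

def has_negative_cycle (V : Int) (edges : List (Int × Int × Int)) : Bool :=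
  pvAOuter V edges (PySem.List.pyRange 0 V 1) (List.replicate V.toNat 0)

-- ===== PORT B =====
-- B's sweep(d): one functional relaxation pass ('nd = list(d)' then in-place updates on nd)
def pvSweep (edges : List (Int × Int × Int)) (d : List Int) : List Int :=
  edges.foldl (fun nd e =>
    let du := PySem.List.pyGetD nd e.1 0
    let dv := PySem.List.pyGetD nd e.2.1 0
    if du + e.2.2 < dv then PySem.List.pySetD nd e.2.1 (du + e.2.2) else nd) d

-- B's go(d, k): recursive fixpoint iteration with early exit when a sweep changes nothing
def pvGo (edges : List (Int × Int × Int)) (d : List Int) (k : Int) : Bool :=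
  if h : k ≤ 0 then false
  else
    let nd := pvSweep edges d
    if nd = d then false
    else if k = 1 then true
    else pvGo edges nd (k - 1)
termination_by k.toNat
decreasing_by omega

def has_negative_cycle_alt (V : Int) (edges : List (Int × Int × Int)) : Bool :=
  pvGo edges (List.replicate V.toNat 0) V

-- ===== PRECONDITION & SPEC =====
-- Pre_ excludes graphs with V ≥ 1 and an edge endpoint outside [-V, V-1]: Python A raises
-- IndexError there, except when an earlier in-range edge already fires the final-pass
-- 'return True' before the bad edge is read — B's sweep raises IndexError there (see cites).
def Pre_has_negative_cycle (V : Int) (edges : List (Int × Int × Int)) : Prop :=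
  V ≤ 0 ∨ ∀ e ∈ edges, -V ≤ e.1 ∧ e.1 < V ∧ -V ≤ e.2.1 ∧ e.2.1 < V
instance (V : Int) (edges : List (Int × Int × Int)) : Decidable (Pre_has_negative_cycle V edges) := by unfold Pre_has_negative_cycle; infer_instance

def pvWitness_has_negative_cycle : Int × (List (Int × Int × Int)) := (2, [(0, 1, -3), (1, 0, 1)])

def Spec_has_negative_cycle (V : Int) (edges : List (Int × Int × Int)) (out : Bool) : Prop := out = has_negative_cycle_alt V edges
instance (V : Int) (edges : List (Int × Int × Int)) (out : Bool) : Decidable (Spec_has_negative_cycle V edges out) := by unfold Spec_has_negative_cycle; infer_instance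

-- ===== CLAIM (what is proved, stated in full; the proofs are below) =====
def Claim_equal_has_negative_cycle : Prop := ∀ (V : Int) (edges : List (Int × Int × Int)), Dom_has_negative_cycle V edges → Pre_has_negative_cycle V edges → Spec_has_negative_cycle V edges (has_negative_cycle V edges)

-- ===== LEMMAS AND PROOFS =====

-- the single relaxation step shared (as a value) by both ports' inner loops
def pvStep (nd : List Int) (e : Int × Int × Int) : List Int :=
  if PySem.List.pyGetD nd e.1 0 + e.2.2 < PySem.List.pyGetD nd e.2.1 0
  then PySem.List.pySetD nd e.2.1 (PySem.List.pyGetD nd e.1 0 + e.2.2) else nd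

theorem pvSweep_eq_foldl (edges : List (Int × Int × Int)) (d : List Int) :
    pvSweep edges d = edges.foldl pvStep d := rfl

-- 'some edge of es is relaxable at d'
def pvAny (es : List (Int × Int × Int)) (d : List Int) : Bool :=
  es.any (fun e => decide (PySem.List.pyGetD d e.1 0 + e.2.2 < PySem.List.pyGetD d e.2.1 0))

-- normalized (wrapped) index
def pvIdx (n : Nat) (i : Int) : Nat := if 0 ≤ i then i.toNat else n - (-i).toNat

theorem pvIdx_lt (n : Nat) (i : Int) (h : PySem.Raise.InRange n i) : pvIdx n i < n := by
  unfold PySem.Raise.InRange at h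
  unfold pvIdx
  split <;> omega

theorem pyIdx?_eq_pvIdx (n : Nat) (i : Int) (h : PySem.Raise.InRange n i) :
    PySem.List.pyIdx? n i = some (pvIdx n i) := by
  unfold PySem.Raise.InRange at h
  unfold PySem.List.pyIdx? pvIdx
  split <;> split <;> first | rfl | omega

theorem pyGetD_norm (d : List Int) (i : Int) (h : PySem.Raise.InRange d.length i) :
    PySem.List.pyGetD d i 0 = d.getD (pvIdx d.length i) 0 := by
  unfold PySem.List.pyGetD PySem.List.pyGet?
  rw [pyIdx?_eq_pvIdx _ _ h]
  simp [List.getD_eq_getElem?_getD]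

theorem pySetD_norm (d : List Int) (i : Int) (v : Int) (h : PySem.Raise.InRange d.length i) :
    PySem.List.pySetD d i v = d.set (pvIdx d.length i) v := by
  unfold PySem.List.pySetD PySem.List.pySet?
  rw [pyIdx?_eq_pvIdx _ _ h]
  rfl

theorem pySetD_invalid (d : List Int) (i : Int) (v : Int) (h : ¬ PySem.Raise.InRange d.length i) :
    PySem.List.pySetD d i v = d := by
  unfold PySem.Raise.InRange at h
  unfold PySem.List.pySetD PySem.List.pySet? PySem.List.pyIdx?
  split <;> split <;> first | rfl | omega

-- pointwise ≤ on dist vectors (with equal length), via total getD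
def pvLe (d' d : List Int) : Prop :=
  d'.length = d.length ∧ ∀ i : Nat, d'.getD i 0 ≤ d.getD i 0

theorem pvLe_refl (d : List Int) : pvLe d d := ⟨rfl, fun _ => le_refl _⟩

theorem pvLe_trans {a b c : List Int} (h1 : pvLe a b) (h2 : pvLe b c) : pvLe a c :=
  ⟨h1.1.trans h2.1, fun i => (h1.2 i).trans (h2.2 i)⟩

theorem getD_set_le (d : List Int) (j : Nat) (v : Int) (hv : v ≤ d.getD j 0) (i : Nat) :
    (d.set j v).getD i 0 ≤ d.getD i 0 := by
  by_cases hij : i = j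
  · subst hij
    by_cases hi : i < d.length
    · simpa [List.getD_eq_getElem?_getD, hi] using hv
    · simp [List.getD_eq_getElem?_getD, hi]
  · have hji : j ≠ i := fun h => hij h.symm
    simp [List.getD_eq_getElem?_getD, hji]

theorem pvLe_step (d : List Int) (e : Int × Int × Int) : pvLe (pvStep d e) d := by
  unfold pvStep
  split
  · rename_i hrel
    by_cases hin : PySem.Raise.InRange d.length e.2.1
    · rw [pySetD_norm _ _ _ hin]
      refine ⟨by simp, fun i => ?_⟩
      apply getD_set_le
      rw [pyGetD_norm _ _ hin] at hrel
      exact le_of_lt hrel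
    · rw [pySetD_invalid _ _ _ hin]; exact pvLe_refl d
  · exact pvLe_refl d

theorem pvLe_fold (es : List (Int × Int × Int)) (d : List Int) :
    pvLe (es.foldl pvStep d) d := by
  induction es generalizing d with
  | nil => exact pvLe_refl d
  | cons e rest ih => exact pvLe_trans (ih (pvStep d e)) (pvLe_step d e)

theorem length_fold_pvStep (es : List (Int × Int × Int)) (d : List Int) :
    (es.foldl pvStep d).length = d.length := (pvLe_fold es d).1

-- no relaxable edge ⇒ the sweep changes nothing
theorem fold_fix (es : List (Int × Int × Int)) (d : List Int) (h : pvAny es d = false) :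
    es.foldl pvStep d = d := by
  induction es with
  | nil => rfl
  | cons e rest ih =>
    simp only [pvAny, List.any_cons, Bool.or_eq_false_iff, decide_eq_false_iff_not] at h
    simp only [List.foldl_cons, pvStep, if_neg h.1]
    exact ih h.2

-- a relaxable edge with valid endpoints ⇒ the sweep strictly decreases some entry
theorem fold_ne (es : List (Int × Int × Int)) (d : List Int)
    (hin : ∀ e ∈ es, PySem.Raise.InRange d.length e.2.1)
    (h : pvAny es d = true) : es.foldl pvStep d ≠ d := by
  induction es with
  | nil => simp [pvAny] at h
  | cons e rest ih =>
    by_cases hrel : PySem.List.pyGetD d e.1 0 + e.2.2 < PySem.List.pyGetD d e.2.1 0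
    · have hinv := hin e (by simp)
      simp only [List.foldl_cons, pvStep, if_pos hrel, pySetD_norm _ _ _ hinv]
      set j := pvIdx d.length e.2.1 with hj
      set v := PySem.List.pyGetD d e.1 0 + e.2.2 with hv
      have hjlt : j < d.length := pvIdx_lt _ _ hinv
      have hdv : PySem.List.pyGetD d e.2.1 0 = d.getD j 0 := pyGetD_norm _ _ hinv
      intro heq
      have hset : (d.set j v).getD j 0 = v := by
        rw [List.getD_eq_getElem?_getD, List.getElem?_set]
        simp [hjlt]
      have hle := (pvLe_fold rest (d.set j v)).2 j
      rw [heq, hset] at hle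
      rw [hdv] at hrel
      exact absurd hle (not_le.mpr hrel)
    · simp only [List.foldl_cons, pvStep, if_neg hrel]
      apply ih (fun e he => hin e (by simp [he]))
      simp only [pvAny, List.any_cons, Bool.or_eq_true, decide_eq_true_eq] at h
      rcases h with h | h
      · exact absurd h hrel
      · simpa [pvAny] using h

theorem sweep_fix_iff (edges : List (Int × Int × Int)) (d : List Int)
    (hin : ∀ e ∈ edges, PySem.Raise.InRange d.length e.2.1) :
    pvSweep edges d = d ↔ pvAny edges d = false := by
  rw [pvSweep_eq_foldl]
  constructor
  · intro h
    by_contra hc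
    exact fold_ne edges d hin (by simpa using hc) h
  · exact fold_fix edges d

theorem length_pvSweep (edges : List (Int × Int × Int)) (d : List Int) :
    (pvSweep edges d).length = d.length := length_fold_pvStep edges d

-- ===== A-side lemmas =====

-- a non-final pass of A never early-returns and is exactly one sweep
theorem pvAInner_ne (V i : Int) (h : i ≠ V - 1) :
    ∀ (edges : List (Int × Int × Int)) (dist : List Int),
      pvAInner V i dist edges = .inr (pvSweep edges dist) := by
  intro edges
  induction edges with
  | nil => intro dist; rfl
  | cons e rest ih =>
    intro dist
    obtain ⟨u, v, w⟩ := e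
    simp only [pvAInner, pvSweep_eq_foldl, List.foldl_cons, pvStep]
    by_cases hc : PySem.List.pyGetD dist u 0 + w < PySem.List.pyGetD dist v 0
    · rw [if_pos hc, if_neg h, ih]
      simp [pvSweep_eq_foldl, hc]
    · rw [if_neg hc, ih]
      simp [pvSweep_eq_foldl, hc]

-- the final pass of A returns true exactly when some edge is relaxable at the entering dist
theorem pvAInner_last (V : Int) :
    ∀ (edges : List (Int × Int × Int)) (dist : List Int),
      (match pvAInner V (V - 1) dist edges with
        | .inl b => b
        | .inr _ => false) = pvAny edges dist := by
  intro edges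
  induction edges with
  | nil => intro dist; rfl
  | cons e rest ih =>
    intro dist
    obtain ⟨u, v, w⟩ := e
    simp only [pvAInner, pvAny, List.any_cons]
    by_cases hc : PySem.List.pyGetD dist u 0 + w < PySem.List.pyGetD dist v 0
    · simp [hc]
    · simp only [if_neg hc]
      rw [ih]
      simp [pvAny, hc]

-- A's outer loop: the non-final passes fold the sweep over dist
theorem pvAOuter_append (V : Int) (edges : List (Int × Int × Int)) :
    ∀ (is : List Int) (dist : List Int), (∀ i ∈ is, i ≠ V - 1) →
      pvAOuter V edges (is ++ [V - 1]) dist =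
      pvAOuter V edges [V - 1] (is.foldl (fun d _ => pvSweep edges d) dist) := by
  intro is
  induction is with
  | nil => intro dist _; rfl
  | cons i rest ih =>
    intro dist h
    have hi : i ≠ V - 1 := h i (by simp)
    simp only [List.cons_append, pvAOuter, pvAInner_ne V i hi edges dist, List.foldl_cons]
    exact ih _ (fun j hj => h j (by simp [hj]))

theorem foldl_const_iterate {α β : Type} (f : α → α) (l : List β) (d : α) :
    l.foldl (fun d _ => f d) d = f^[l.length] d := by
  induction l generalizing d with
  | nil => rfl
  | cons b rest ih => simp [ih, Function.iterate_succ_apply]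

-- ===== B-side main lemma =====

theorem pvGo_eq (V : Int) (edges : List (Int × Int × Int)) (hV : 0 < V)
    (hIn : ∀ e ∈ edges, -V ≤ e.1 ∧ e.1 < V ∧ -V ≤ e.2.1 ∧ e.2.1 < V) :
    ∀ (m : Nat) (d : List Int), d.length = V.toNat →
      pvGo edges d ((m : Int) + 1) = pvAny edges ((pvSweep edges)^[m] d) := by
  intro m
  induction m with
  | zero =>
    intro d hlen
    have hin : ∀ e ∈ edges, PySem.Raise.InRange d.length e.2.1 := by
      intro e he
      have := hIn e he
      unfold PySem.Raise.InRange
      omega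
    rw [pvGo]
    rw [dif_neg (by omega : ¬ ((0 : Nat) : Int) + 1 ≤ 0)]
    simp only [Function.iterate_zero, id]
    by_cases hfix : pvSweep edges d = d
    · rw [if_pos hfix]
      exact ((sweep_fix_iff edges d hin).1 hfix).symm
    · rw [if_neg hfix, if_pos (by norm_num)]
      by_cases hany : pvAny edges d = true
      · exact hany.symm
      · exact absurd ((sweep_fix_iff edges d hin).2 (by simpa using hany)) hfix
  | succ m ih =>
    intro d hlen
    have hin : ∀ e ∈ edges, PySem.Raise.InRange d.length e.2.1 := by
      intro e he
      have := hIn e he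
      unfold PySem.Raise.InRange
      omega
    rw [pvGo]
    rw [dif_neg (by push_cast; omega : ¬ ((m + 1 : Nat) : Int) + 1 ≤ 0)]
    by_cases hfix : pvSweep edges d = d
    · rw [if_pos hfix]
      rw [Function.iterate_fixed hfix]
      exact ((sweep_fix_iff edges d hin).1 hfix).symm
    · rw [if_neg hfix, if_neg (by push_cast; omega : ¬ ((m + 1 : Nat) : Int) + 1 = 1)]
      have harg : ((m + 1 : Nat) : Int) + 1 - 1 = ((m : Nat) : Int) + 1 := by push_cast; ring
      rw [harg, ih (pvSweep edges d) (by rw [length_pvSweep]; exact hlen)]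
      rw [Function.iterate_succ_apply]

-- ===== VERDICT (by name: the statement is the Claim_ definition above) =====

theorem has_negative_cycle_spec : Claim_equal_has_negative_cycle := by
  intro V edges _ hPre
  unfold Spec_has_negative_cycle has_negative_cycle has_negative_cycle_alt
  by_cases hV : V ≤ 0
  · rw [PySem.List.pyRange_one_eq_nil (by omega)]
    rw [pvGo]
    simp [pvAOuter, hV]
  · have hVpos : 0 < V := by omega
    have hIn : ∀ e ∈ edges, -V ≤ e.1 ∧ e.1 < V ∧ -V ≤ e.2.1 ∧ e.2.1 < V := by
      rcases hPre with h | h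
      · omega
      · exact h
    have hsplit : PySem.List.pyRange 0 V 1 = PySem.List.pyRange 0 (V - 1) 1 ++ [V - 1] := by
      have := PySem.List.pyRange_one_succ_right (a := 0) (b := V - 1) (by omega)
      simpa [sub_add_cancel] using this
    rw [hsplit, pvAOuter_append V edges _ _ (by
      intro i hi
      have := (PySem.List.mem_pyRange_one (a := 0) (b := V - 1) (x := i)).1 hi
      omega)]
    rw [foldl_const_iterate]
    have hlenr : (PySem.List.pyRange 0 (V - 1) 1).length = (V - 1).toNat := by
      rw [PySem.List.length_pyRange_one]; norm_num
    rw [hlenr]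
    have hVeq : V = (((V - 1).toNat : Nat) : Int) + 1 := by omega
    rw [show pvGo edges (List.replicate V.toNat 0) V
        = pvGo edges (List.replicate V.toNat 0) ((((V - 1).toNat : Nat) : Int) + 1) by rw [← hVeq]]
    rw [pvGo_eq V edges hVpos hIn ((V - 1).toNat) _ (by simp)]
    simp only [pvAOuter, pvAInner_last V edges]
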